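-- pv_equiv track=rewrite | github.com/violet-burbank/Text-ID | TextID.py | makeWordLengthDictionary
-- ===== SOURCE A (Python) =====
-- def makeWordLengthDictionary (wordList):
--     """ returns a dictionary of word lengths and their frequencies """
--     wordLengthDictionary = {}
--     for i in wordList:
--         if not (len(i) in list(wordLengthDictionary.keys())):
--             wordLengthDictionary[len(i)] = 1
--         else:
--             wordLengthDictionary[len(i)] += 1
--
--     return wordLengthDictionary
-- ===== SOURCE B (Python) =====
-- def makeWordLengthDictionary(wordList):
--     """ returns a dictionary of word lengths and their frequencies """
--     lengths = [len(w) for w in wordList]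
--     distinct = list(dict.fromkeys(lengths))
--     return {L: lengths.count(L) for L in distinct}
-- ===== Notes on version B (the rewrite author's own statement) =====
-- stated objective: simpler
-- what changed: B collects all word lengths first, deduplicates them in first-occurrence order, and builds the result with one count() per distinct length, instead of A's single-pass incremental dict loop that rebuilds list(keys()) for a membership test on every word.
import Mathlib
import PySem

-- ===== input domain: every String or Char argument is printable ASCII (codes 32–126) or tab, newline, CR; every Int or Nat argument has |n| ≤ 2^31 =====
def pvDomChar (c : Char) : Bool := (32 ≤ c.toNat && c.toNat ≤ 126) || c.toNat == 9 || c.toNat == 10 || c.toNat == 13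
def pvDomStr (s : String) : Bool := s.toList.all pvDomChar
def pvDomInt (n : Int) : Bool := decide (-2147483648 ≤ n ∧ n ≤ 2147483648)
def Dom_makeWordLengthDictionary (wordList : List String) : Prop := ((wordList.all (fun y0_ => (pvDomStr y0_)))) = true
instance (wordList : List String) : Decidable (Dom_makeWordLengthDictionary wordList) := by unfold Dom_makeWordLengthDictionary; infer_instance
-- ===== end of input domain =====

-- B builds the lengths list once, dedups it in first-occurrence order and counts each
-- distinct length, instead of A's incremental dict membership-test-and-update loop (objective: simpler).

-- ===== PORT A =====
def makeWordLengthDictionary (wordList : List String) : List (Int × Int) :=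
  (wordList.foldl
    (fun d i =>
      if !((PySem.Dict.keys d).contains (PySem.Str.len i)) then
        d.insert (PySem.Str.len i) 1
      else
        d.insert (PySem.Str.len i) (d.getD (PySem.Str.len i) 0 + 1))
    PySem.Dict.empty).items

-- ===== PORT B =====
def makeWordLengthDictionary_alt (wordList : List String) : List (Int × Int) :=
  let lengths := wordList.map (fun w => PySem.Str.len w)
  let distinct := PySem.List.dedup lengths
  distinct.map (fun L => (L, (lengths.count L : Int)))

-- ===== PRECONDITION & SPEC =====
def Spec_makeWordLengthDictionary (wordList : List String) (out : List (Int × Int)) : Prop := out = makeWordLengthDictionary_alt wordList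
instance (wordList : List String) (out : List (Int × Int)) : Decidable (Spec_makeWordLengthDictionary wordList out) := by unfold Spec_makeWordLengthDictionary; infer_instance

-- ===== CLAIM (what is proved, stated in full; the proofs are below) =====
def Claim_equal_makeWordLengthDictionary : Prop := ∀ (wordList : List String), Dom_makeWordLengthDictionary wordList → Spec_makeWordLengthDictionary wordList (makeWordLengthDictionary wordList)

-- ===== LEMMAS AND PROOFS =====

-- ===== VERDICT (by name: the statement is the Claim_ definition above) =====
lemma step_eq (d : PySem.Dict Int Int) (k : Int) :
    (if !((PySem.Dict.keys d).contains k) then d.insert k 1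
     else d.insert k (d.getD k 0 + 1)) = d.insert k (d.getD k 0 + 1) := by
  by_cases h : k ∈ d.keys
  · simp [h]
  · have hc : d.contains k = false := by
      rw [PySem.Dict.contains_eq_decide_mem_keys]
      simpa using h
    simp [h, PySem.Dict.getD_of_not_contains (h := hc)]

lemma foldA_eq (wordList : List String) :
    wordList.foldl
      (fun d i =>
        if !((PySem.Dict.keys d).contains (PySem.Str.len i)) then
          d.insert (PySem.Str.len i) 1
        else
          d.insert (PySem.Str.len i) (d.getD (PySem.Str.len i) 0 + 1))
      (PySem.Dict.empty : PySem.Dict Int Int)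
      = PySem.Dict.counter (wordList.map (fun w => PySem.Str.len w)) := by
  rw [← PySem.Dict.foldl_insert_getD_add_one_eq_counter, List.foldl_map]
  exact PySem.List.foldl_congr_mem _ _ _ _ (fun d i _ => step_eq d (PySem.Str.len i))

theorem makeWordLengthDictionary_spec : Claim_equal_makeWordLengthDictionary := by
  intro wordList _
  unfold Spec_makeWordLengthDictionary makeWordLengthDictionary makeWordLengthDictionary_alt
  rw [foldA_eq, PySem.Dict.items_counter]
  simp [PySem.List.dedup_eq_ofList]
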